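-- pv_equiv track=rewrite | github.com/ProductDiscoveryPcCom/abra-trend-hunter-v3 | modules/google_news.py | _words_are_close
-- ===== SOURCE A (Python) =====
-- def _words_are_close(text: str, words: set, max_distance: int = 10) -> bool:
--     """
--     Verifica si las palabras aparecen cerca una de otra en el texto.
--
--     Returns:
--         True si las palabras están a menos de max_distance palabras de distancia
--     """
--     text_words = text.split()
--
--     positions = {}
--     for i, word in enumerate(text_words):
--         if word in words:
--             if word not in positions:
--                 positions[word] = []
--             positions[word].append(i)
--
--     # Si no encontramos todas las palabras, no están cerca
--     if len(positions) < len(words):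
--         return False
--
--     # Verificar distancia mínima entre la primera y última palabra
--     all_positions = []
--     for pos_list in positions.values():
--         all_positions.extend(pos_list)
--
--     if not all_positions:
--         return False
--
--     min_pos = min(all_positions)
--     max_pos = max(all_positions)
--
--     return (max_pos - min_pos) <= max_distance
-- ===== SOURCE B (Python) =====
-- def _words_are_close(text: str, words: set, max_distance: int = 10) -> bool:
--     """Single pass over text.split(): track the set of target words seen and the
--     first/last index of any match, instead of building a positions dict and
--     flattening it for min/max."""
--     found = set()
--     min_pos = None
--     max_pos = None
--     for i, word in enumerate(text.split()):
--         if word in words: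
--             found.add(word)
--             if min_pos is None:
--                 min_pos = i
--             max_pos = i
--     if min_pos is None:
--         return False
--     if len(found) != len(words):
--         return False
--     return (max_pos - min_pos) <= max_distance
-- ===== Notes on version B (the rewrite author's own statement) =====
-- stated objective: simpler
-- what changed: Replaces A's positions dict (word -> index list) plus the separate flatten/min/max passes with a single left-to-right pass that keeps only the set of matched target words and the first/last matched index.
import Mathlib
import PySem

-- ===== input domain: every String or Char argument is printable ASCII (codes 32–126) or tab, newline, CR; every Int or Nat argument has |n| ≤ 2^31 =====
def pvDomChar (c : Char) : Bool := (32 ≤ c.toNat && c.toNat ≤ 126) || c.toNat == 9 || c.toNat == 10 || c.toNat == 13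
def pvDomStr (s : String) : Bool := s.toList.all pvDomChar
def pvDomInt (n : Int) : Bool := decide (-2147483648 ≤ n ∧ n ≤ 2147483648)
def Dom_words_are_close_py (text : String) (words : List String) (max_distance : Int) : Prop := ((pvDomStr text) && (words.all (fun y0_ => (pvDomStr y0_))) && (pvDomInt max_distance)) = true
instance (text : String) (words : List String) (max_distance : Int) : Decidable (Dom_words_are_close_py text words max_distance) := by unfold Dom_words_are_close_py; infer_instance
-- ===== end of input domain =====

-- B folds the split words once, tracking the set of matched target words and the first/last
-- match index, instead of A's positions-dict plus separate flatten/min/max passes (objective: simpler).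


-- ===== PORT A =====
-- `words` arrives as a Python set: modelled as PySem.Set.ofList words (distinct elements, first-occurrence order).
-- The Python's "if word not in positions: positions[word] = []; positions[word].append(i)" is Dict.modify with default [].
def words_are_close_py (text : String) (words : List String) (max_distance : Int) : Bool :=
  let ws : PySem.Set String := PySem.Set.ofList words
  let text_words := PySem.Str.split₀ text
  let positions : PySem.Dict String (List Int) :=
    (PySem.List.enumerate text_words).foldl
      (fun d p => if PySem.Set.contains ws p.2 then d.modify p.2 [] (fun l => l ++ [p.1]) else d)
      PySem.Dict.empty
  if positions.size < ws.length then false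
  else
    let all_positions : List Int := positions.values.foldl (fun acc l => acc ++ l) []
    if all_positions = [] then false
    else
      -- min()/max() guarded by the nonemptiness test above, so the none branch is unreachable
      match PySem.List.min? all_positions (fun x => x), PySem.List.max? all_positions (fun x => x) with
      | some mn, some mx => decide (mx - mn ≤ max_distance)
      | _, _ => false

-- ===== PORT B =====
-- state = (found, min_pos, max_pos), one left fold over enumerate(text.split())
def words_are_close_py_alt (text : String) (words : List String) (max_distance : Int) : Bool :=
  let ws : PySem.Set String := PySem.Set.ofList words
  let st :=
    (PySem.List.enumerate (PySem.Str.split₀ text)).foldl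
      (fun (st : PySem.Set String × Option Int × Option Int) p =>
        if PySem.Set.contains ws p.2 then
          (PySem.Set.add st.1 p.2,
           (match st.2.1 with | none => some p.1 | some v => some v),
           some p.1)
        else st)
      (PySem.Set.empty, none, none)
  match st.2.1, st.2.2 with
  | none, _ => false
  | some mn, some mx =>
      if st.1.length ≠ ws.length then false else decide (mx - mn ≤ max_distance)
  | some _, none => false

-- ===== PRECONDITION & SPEC =====
def Spec_words_are_close_py (text : String) (words : List String) (max_distance : Int) (out : Bool) : Prop := out = words_are_close_py_alt text words max_distance
instance (text : String) (words : List String) (max_distance : Int) (out : Bool) : Decidable (Spec_words_are_close_py text words max_distance out) := by unfold Spec_words_are_close_py; infer_instance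

-- ===== CLAIM (what is proved, stated in full; the proofs are below) =====
def Claim_equal_words_are_close_py : Prop := ∀ (text : String) (words : List String) (max_distance : Int), Dom_words_are_close_py text words max_distance → Spec_words_are_close_py text words max_distance (words_are_close_py text words max_distance)

-- ===== LEMMAS AND PROOFS =====

-- B's conditional fold with componentwise state = three folds over the filtered list
lemma pvBFold (ws : PySem.Set String) (l : List (Int × String)) (a : PySem.Set String) (b c : Option Int) :
    l.foldl (fun st p => if PySem.Set.contains ws p.2 then
        (PySem.Set.add st.1 p.2, (match st.2.1 with | none => some p.1 | some v => some v), some p.1)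
      else st) (a, b, c)
      = ((l.filter (fun p => PySem.Set.contains ws p.2)).foldl (fun s p => PySem.Set.add s p.2) a,
         (l.filter (fun p => PySem.Set.contains ws p.2)).foldl
           (fun (o : Option Int) p => match o with | none => some p.1 | some v => some v) b,
         (l.filter (fun p => PySem.Set.contains ws p.2)).foldl (fun (_ : Option Int) p => some p.1) c) := by
  induction l generalizing a b c with
  | nil => simp
  | cons x t ih =>
    by_cases hx : PySem.Set.contains ws x.2 <;>
      simp only [List.foldl_cons, List.filter_cons, hx, if_true, if_false, Bool.false_eq_true] <;>
      exact ih _ _ _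

lemma pvMinFoldSome {σ : Type} (l : List (Int × σ)) (a : Int) :
    l.foldl (fun (o : Option Int) p => match o with | none => some p.1 | some v => some v) (some a)
      = some a := by
  induction l with
  | nil => rfl
  | cons x t ih => simpa using ih

lemma pvMinFoldHead {σ : Type} (l : List (Int × σ)) (hl : l ≠ []) :
    l.foldl (fun (o : Option Int) p => match o with | none => some p.1 | some v => some v) none
      = some ((l.head hl).1) := by
  obtain ⟨x, t, rfl⟩ := List.exists_cons_of_ne_nil hl
  simpa using pvMinFoldSome t x.1

lemma pvMaxFoldLast {σ : Type} (l : List (Int × σ)) (hl : l ≠ []) (o : Option Int) :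
    l.foldl (fun (_ : Option Int) p => some p.1) o = some ((l.getLast hl).1) := by
  induction l generalizing o with
  | nil => exact absurd rfl hl
  | cons x t ih =>
    cases t with
    | nil => rfl
    | cons y u => simpa [List.getLast_cons] using ih (by simp) (some x.1)

lemma pvFoldlAppend (l : List (List Int)) (a : List Int) :
    l.foldl (fun acc x => acc ++ x) a = a ++ l.flatten := by
  induction l generalizing a with
  | nil => simp
  | cons x t ih => simp [ih, List.append_assoc]

lemma pvPairwiseHeadLe (m : List (Int × String)) (hm : m ≠ [])
    (hpw : m.Pairwise (fun p q => p.1 < q.1)) : ∀ q ∈ m, (m.head hm).1 ≤ q.1 := by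
  obtain ⟨x, t, rfl⟩ := List.exists_cons_of_ne_nil hm
  intro q hq
  rcases List.mem_cons.mp hq with rfl | hq
  · simp
  · exact le_of_lt ((List.pairwise_cons.mp hpw).1 q hq)

lemma pvPairwiseLastGe (m : List (Int × String)) (hm : m ≠ [])
    (hpw : m.Pairwise (fun p q => p.1 < q.1)) : ∀ q ∈ m, q.1 ≤ (m.getLast hm).1 := by
  intro q hq
  have hsplit := List.dropLast_append_getLast hm
  rw [← hsplit] at hpw hq
  rcases List.mem_append.mp hq with hq | hq
  · exact le_of_lt ((List.pairwise_append.mp hpw).2.2 q hq _ (List.mem_singleton_self _))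
  · rw [List.mem_singleton.mp hq]

-- the first component of min?/max? uniqueness: value determined by membership + extremality
lemma pvMinEq (l : List Int) (v : Int) (hv : v ∈ l) (hle : ∀ y ∈ l, v ≤ y) :
    PySem.List.min? l (fun x => x) = some v := by
  cases hmin : PySem.List.min? l (fun x => x) with
  | none =>
    rw [PySem.List.min?_eq_none_iff] at hmin
    subst hmin; cases hv
  | some u =>
    have h1 := PySem.List.min?_isMin hmin v hv
    have h2 := hle u (PySem.List.min?_mem hmin)
    simp at h1
    exact congrArg some (le_antisymm h2 h1).symm

lemma pvMaxEq (l : List Int) (v : Int) (hv : v ∈ l) (hle : ∀ y ∈ l, y ≤ v) :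
    PySem.List.max? l (fun x => x) = some v := by
  cases hmax : PySem.List.max? l (fun x => x) with
  | none =>
    rw [PySem.List.max?_eq_none_iff] at hmax
    subst hmax; cases hv
  | some u =>
    have h1 := PySem.List.max?_isMax hmax v hv
    have h2 := hle u (PySem.List.max?_mem hmax)
    simp at h1
    exact congrArg some (le_antisymm h1 h2).symm

-- ===== VERDICT (by name: the statement is the Claim_ definition above) =====
theorem words_are_close_py_spec : Claim_equal_words_are_close_py := by
  intro text words max_distance _
  unfold Spec_words_are_close_py words_are_close_py words_are_close_py_alt
  set ws : PySem.Set String := PySem.Set.ofList words with hws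
  set tw := PySem.Str.split₀ text with htw
  simp only []
  rw [pvBFold]
  rw [← List.foldl_filter]
  set m := (PySem.List.enumerate tw).filter (fun p => PySem.Set.contains ws p.2) with hmdef
  dsimp only
  have hker : ∀ x ∈ m, PySem.Set.contains ws x.2 = true := by
    intro x hx
    rw [hmdef] at hx
    exact (List.mem_filter.mp hx).2
  have hpw : m.Pairwise (fun p q => p.1 < q.1) := by
    rw [hmdef]
    exact (PySem.List.pairwise_lt_enumerate tw 0).filter _
  set d := List.foldl (fun d p => d.modify p.2 [] fun l => l ++ [p.1]) PySem.Dict.empty m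
    with hd
  have hkeys : d.keys = PySem.Set.ofList (m.map (fun p => p.2)) := by
    rw [hd, PySem.Dict.keys_foldl_modify_key m (fun p => p.2) [] (fun _ p l => l ++ [p.1])
          PySem.Dict.empty]
    simp [PySem.Set.update_nil_left]
  have hfound : List.foldl (fun s p => PySem.Set.add s p.2) PySem.Set.empty m
      = PySem.Set.ofList (m.map (fun p => p.2)) := by
    rw [← PySem.Set.update_map_eq_foldl_add]
    exact PySem.Set.update_nil_left _
  have hnodupK : d.keys.Nodup := by
    rw [hkeys]; exact PySem.Set.nodup_ofList _
  have hsize : d.size = d.keys.length := by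
    simp [PySem.Dict.size, PySem.Dict.keys]
  have hgetD : ∀ c, d.getD c [] = (m.filter (fun p => p.2 == c)).map (fun p => p.1) := by
    intro c
    have hswap : d = List.foldl (fun d q => d.modify q.1 [] fun l => l ++ [q.2])
        PySem.Dict.empty (m.map (fun p => (p.2, p.1))) := by
      rw [hd, List.foldl_map]
    rw [hswap, PySem.Dict.getD_foldl_modify_append]
    simp [List.filter_map, Function.comp_def, List.map_map]
  have hvals : d.values = d.keys.map (fun k => d.getD k []) :=
    PySem.Dict.values_eq_map_keys d hnodupK []
  have hmem : ∀ x, x ∈ d.values.flatten ↔ x ∈ m.map (fun p => p.1) := by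
    intro x
    simp only [hvals, hkeys, hgetD, List.mem_flatten, List.mem_map]
    constructor
    · rintro ⟨l, ⟨k, hk, rfl⟩, hx⟩
      obtain ⟨p, hp, rfl⟩ := List.mem_map.mp hx
      exact ⟨p, (List.mem_filter.mp hp).1, rfl⟩
    · rintro ⟨p, hp, rfl⟩
      refine ⟨(m.filter (fun q => q.2 == p.2)).map (fun q => q.1),
        ⟨p.2, ?_, rfl⟩, List.mem_map_of_mem (List.mem_filter.mpr ⟨hp, by simp⟩)⟩
      exact (PySem.Set.mem_ofList _ _).mpr (List.mem_map_of_mem hp)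
  rw [hfound, pvFoldlAppend, List.nil_append]
  by_cases hm : m = []
  · rw [hm] at hd ⊢
    have hdemp : d = PySem.Dict.empty := hd
    simp [hdemp, PySem.Dict.empty, PySem.Dict.values, PySem.Dict.size]
  · -- nonempty matched list
    have hhd1 : List.foldl
        (fun (o : Option Int) p => match o with | none => some p.1 | some v => some v) none m
        = some ((m.head hm).1) := pvMinFoldHead m hm
    have hlst1 : List.foldl (fun (_ : Option Int) p => some p.1) none m
        = some ((m.getLast hm).1) := pvMaxFoldLast m hm none
    have hheadmem : (m.head hm).1 ∈ d.values.flatten :=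
      (hmem _).mpr (List.mem_map_of_mem (List.head_mem hm))
    have hapne : d.values.flatten ≠ [] := List.ne_nil_of_mem hheadmem
    have hmin : PySem.List.min? d.values.flatten (fun x => x) = some ((m.head hm).1) := by
      refine pvMinEq _ _ hheadmem ?_
      intro y hy
      obtain ⟨q, hq, rfl⟩ := List.mem_map.mp ((hmem y).mp hy)
      exact pvPairwiseHeadLe m hm hpw q hq
    have hmax : PySem.List.max? d.values.flatten (fun x => x) = some ((m.getLast hm).1) := by
      refine pvMaxEq _ _ ((hmem _).mpr (List.mem_map_of_mem (List.getLast_mem hm))) ?_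
      intro y hy
      obtain ⟨q, hq, rfl⟩ := List.mem_map.mp ((hmem y).mp hy)
      exact pvPairwiseLastGe m hm hpw q hq
    have hsub : PySem.Set.ofList (m.map (fun p => p.2)) ⊆ ws := by
      intro x hx
      obtain ⟨p, hp, rfl⟩ := List.mem_map.mp ((PySem.Set.mem_ofList _ _).mp hx)
      exact (PySem.Set.contains_iff ws p.2).mp (hker p hp)
    have hlen : (PySem.Set.ofList (m.map (fun p => p.2))).length ≤ ws.length :=
      ((PySem.Set.nodup_ofList _).subperm hsub).length_le
    rw [hhd1, hlst1, hsize, hkeys]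
    by_cases heq : (PySem.Set.ofList (m.map (fun p => p.2))).length = ws.length
    · simp [heq, hapne, hmin, hmax]
    · have hlt : (PySem.Set.ofList (m.map (fun p => p.2))).length < ws.length :=
        lt_of_le_of_ne hlen heq
      simp [hlt, heq]
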